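-- pv_equiv track=rewrite | github.com/gggg8657/study | coding_test/SAMSUNG_prep/shigongjoa.py | ShiftU
-- ===== SOURCE A (Python) =====
-- def ShiftU(tworld, start_col, start_row, end_row):
--     _tmp = [0 for _ in range(start_row+1)]
--     for _ in range(start_row, end_row, -1):
--         if tworld[_][start_col] != -1:
--             if _ == 0: continue
--             _tmp[_ - 1] = tworld[_][start_col]
--         else:
--             _tmp[_] = -1
--     for _ in range(start_row, end_row, -1):
--         tworld[_][start_col] = _tmp[_]
--     return tworld
-- ===== SOURCE B (Python) =====
-- def ShiftU(tworld, start_col, start_row, end_row):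
--     # Single top-down pass with a one-cell accumulator instead of A's two
--     # staged passes over a start_row+1 scratch array: `above` carries the
--     # original value of the row just above; at the top there is none, which
--     # behaves like a blocker (-1), so the top cell becomes 0 unless it is -1.
--     above = -1
--     for r in range(start_row, end_row, -1):
--         cur = tworld[r][start_col]
--         if cur == -1:
--             v = -1
--         elif above != -1:
--             v = above
--         else:
--             v = 0
--         tworld[r][start_col] = v
--         above = cur
--     return tworld
-- ===== Notes on version B (the rewrite author's own statement) =====
-- stated objective: simpler
-- what changed: A makes two staged passes: it first scatters the shifted values into a scratch array _tmp of size start_row+1 and then copies _tmp back into the column; B is one single top-down pass with a one-cell accumulator `above` (the original value of the row just above), writing each cell immediately and keeping no scratch array.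
-- outside the precondition, e.g. on ShiftU([[1], [2]], 0, 1, -2): A returns [[2], [0]], B returns [[2], [1]]
import Mathlib
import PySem

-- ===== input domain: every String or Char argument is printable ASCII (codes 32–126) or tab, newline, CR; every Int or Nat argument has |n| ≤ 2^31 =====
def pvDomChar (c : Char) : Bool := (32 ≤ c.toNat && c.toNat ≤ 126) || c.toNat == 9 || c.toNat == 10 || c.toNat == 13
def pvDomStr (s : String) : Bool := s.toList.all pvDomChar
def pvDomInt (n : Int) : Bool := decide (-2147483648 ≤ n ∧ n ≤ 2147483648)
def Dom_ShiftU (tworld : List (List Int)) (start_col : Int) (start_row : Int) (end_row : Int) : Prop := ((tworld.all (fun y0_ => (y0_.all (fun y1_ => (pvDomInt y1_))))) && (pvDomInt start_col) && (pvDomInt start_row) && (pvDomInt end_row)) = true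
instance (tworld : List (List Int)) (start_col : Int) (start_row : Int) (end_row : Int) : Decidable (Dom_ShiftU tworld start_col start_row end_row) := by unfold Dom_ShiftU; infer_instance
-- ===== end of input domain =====

-- B replaces A's two staged passes over a scratch array _tmp by ONE top-down pass
-- carrying a single-cell accumulator (simpler decomposition, O(1) extra space).
-- Both Pythons mutate tworld in place identically; the theorems are about the
-- returned value.

-- ===== PORT A =====
-- shared read/write primitives (Python tworld[r][c] and tworld[r][c] = v;
-- exact when the indices are in Python range, which Pre_ guarantees for every
-- index either port touches; out of range Python raises, pyGetD/pySetD default)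
def pvRd (w : List (List Int)) (c r : Int) : Int :=
  PySem.List.pyGetD (PySem.List.pyGetD w r []) c 0

def pvWrite (w : List (List Int)) (r c v : Int) : List (List Int) :=
  PySem.List.pySetD w r (PySem.List.pySetD (PySem.List.pyGetD w r []) c v)

-- one iteration of A's first loop body (scatter into _tmp)
def pvStepA (w : List (List Int)) (c : Int) (tmp : List Int) (r : Int) : List Int :=
  if pvRd w c r ≠ -1 then
    (if r = 0 then tmp else PySem.List.pySetD tmp (r - 1) (pvRd w c r))
  else PySem.List.pySetD tmp r (-1)

def ShiftU (tworld : List (List Int)) (start_col : Int) (start_row : Int) (end_row : Int) : List (List Int) :=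
  -- _tmp = [0 for _ in range(start_row+1)]
  let tmp0 : List Int := List.replicate (start_row + 1).toNat 0
  let tmp := (PySem.List.pyRange start_row end_row (-1)).foldl (pvStepA tworld start_col) tmp0
  -- for _ in …: tworld[_][start_col] = _tmp[_]
  (PySem.List.pyRange start_row end_row (-1)).foldl
    (fun w r => pvWrite w r start_col (PySem.List.pyGetD tmp r 0)) tworld

-- ===== PORT B =====
-- one iteration of B's single loop: state is (world, above)
def pvStepB (c : Int) (st : List (List Int) × Int) (r : Int) : List (List Int) × Int :=
  let cur := pvRd st.1 c r
  let v : Int := if cur = -1 then -1 else if st.2 ≠ -1 then st.2 else 0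
  (pvWrite st.1 r c v, cur)

def ShiftU_alt (tworld : List (List Int)) (start_col : Int) (start_row : Int) (end_row : Int) : List (List Int) :=
  ((PySem.List.pyRange start_row end_row (-1)).foldl (pvStepB start_col) (tworld, -1)).1

-- ===== PRECONDITION & SPEC =====
-- Pre_ excludes exactly (a) inputs where A raises IndexError (a touched row or
-- column index out of Python range) and (b) nonempty ranges reaching negative row
-- indices (end_row < -1), where A's returned value comes from Python's
-- negative-index wraparound into tworld and _tmp, an accident of the implementation.
def Pre_ShiftU (tworld : List (List Int)) (start_col : Int) (start_row : Int) (end_row : Int) : Prop :=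
  start_row ≤ end_row ∨
    (-1 ≤ end_row ∧ start_row < (tworld.length : Int) ∧
      ∀ r ∈ PySem.List.pyRange start_row end_row (-1),
        PySem.Raise.InRange (PySem.List.pyGetD tworld r []).length start_col)
instance (tworld : List (List Int)) (start_col : Int) (start_row : Int) (end_row : Int) : Decidable (Pre_ShiftU tworld start_col start_row end_row) := by unfold Pre_ShiftU; infer_instance

def pvWitness_ShiftU : List (List Int) × Int × Int × Int := ([[1, -1], [2, 3]], 0, 1, -1)

def Spec_ShiftU (tworld : List (List Int)) (start_col : Int) (start_row : Int) (end_row : Int) (out : List (List Int)) : Prop := out = ShiftU_alt tworld start_col start_row end_row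
instance (tworld : List (List Int)) (start_col : Int) (start_row : Int) (end_row : Int) (out : List (List Int)) : Decidable (Spec_ShiftU tworld start_col start_row end_row out) := by unfold Spec_ShiftU; infer_instance

-- ===== CLAIM (what is proved, stated in full; the proofs are below) =====
def Claim_equal_ShiftU : Prop := ∀ (tworld : List (List Int)) (start_col : Int) (start_row : Int) (end_row : Int), Dom_ShiftU tworld start_col start_row end_row → Pre_ShiftU tworld start_col start_row end_row → Spec_ShiftU tworld start_col start_row end_row (ShiftU tworld start_col start_row end_row)

-- ===== LEMMAS AND PROOFS =====

-- get-after-set for nonnegative Int indices (any element type / default)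
theorem pvGetSet {α : Type} (xs : List α) (d : α) (i j : Int) (v : α)
    (hi0 : 0 ≤ i) (hil : i < (xs.length : Int)) (hj : 0 ≤ j) :
    PySem.List.pyGetD (PySem.List.pySetD xs i v) j d =
      if j = i then v else PySem.List.pyGetD xs j d := by
  rw [PySem.List.pySetD_of_nonneg xs v hi0, PySem.List.pyGetD_of_nonneg _ d hj,
      PySem.List.pyGetD_of_nonneg xs d hj]
  by_cases h : j = i
  · subst h
    simp [List.getD, show j.toNat < xs.length by omega]
  · rw [if_neg h]
    simp [List.getD, show ¬ i.toNat = j.toNat by omega]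

theorem pvGetReplicate (n : Nat) (j : Int) (hj : 0 ≤ j) :
    PySem.List.pyGetD (List.replicate n (0 : Int)) j 0 = 0 := by
  obtain ⟨m, rfl⟩ : ∃ m : Nat, (m : Int) = j := ⟨j.toNat, by omega⟩
  by_cases h : m < n <;>
    simp [PySem.List.pyGetD_natCast, List.getD, h]

-- writing row i does not change reads at a different row, nor the length
theorem pvRdWrite (W : List (List Int)) (i c c' r : Int) (v : Int)
    (hi0 : 0 ≤ i) (hil : i < (W.length : Int)) (hr0 : 0 ≤ r) (hne : r ≠ i) :
    pvRd (pvWrite W i c v) c' r = pvRd W c' r := by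
  unfold pvRd pvWrite
  rw [pvGetSet W [] i r _ hi0 hil hr0, if_neg hne]

theorem pvWriteLen (W : List (List Int)) (i c v : Int) :
    (pvWrite W i c v).length = W.length := by
  unfold pvWrite; rw [PySem.List.length_pySetD]

-- what A's first loop leaves in _tmp: after processing rows m, m-1, …, e+1,
-- entry j (e < j) is -1 if cell j is -1, the cell below if j < m and it is not -1,
-- and otherwise the entry the loop started from.
theorem pvTmpInv (w : List (List Int)) (c e : Int) (he : -1 ≤ e) :
    ∀ (n : Nat) (m : Int), m - e = (n : Int) → e ≤ m →
    ∀ (t : List Int), m < (t.length : Int) → ∀ j : Int, e < j →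
    PySem.List.pyGetD ((PySem.List.pyRange m e (-1)).foldl (pvStepA w c) t) j 0 =
      if j ≤ m then
        (if pvRd w c j = -1 then -1
         else if j < m ∧ pvRd w c (j + 1) ≠ -1 then pvRd w c (j + 1)
         else PySem.List.pyGetD t j 0)
      else PySem.List.pyGetD t j 0 := by
  intro n
  induction n with
  | zero =>
    intro m hme hem t _ j hj
    have hm : m = e := by omega
    subst hm
    rw [PySem.List.pyRange_neg_one_eq_nil le_rfl]
    simp only [List.foldl_nil]
    rw [if_neg (by omega)]
  | succ k ih =>
    intro m hme hem t htl j hj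
    have hlt : e < m := by omega
    rw [PySem.List.pyRange_neg_one_cons hlt]
    simp only [List.foldl_cons]
    have hm0 : 0 ≤ m := by omega
    have hlen : (pvStepA w c t m).length = t.length := by
      unfold pvStepA
      split_ifs <;> simp [PySem.List.length_pySetD]
    have hih := ih (m - 1) (by omega) (by omega) (pvStepA w c t m) (by omega) j hj
    rw [hih]
    have hstep : ∀ i : Int, 0 ≤ i →
        PySem.List.pyGetD (pvStepA w c t m) i 0 =
          if pvRd w c m = -1 then (if i = m then -1 else PySem.List.pyGetD t i 0)
          else if m ≠ 0 ∧ i = m - 1 then pvRd w c m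
          else PySem.List.pyGetD t i 0 := by
      intro i hi
      unfold pvStepA
      by_cases hrm : pvRd w c m = -1
      · rw [if_neg (show ¬ pvRd w c m ≠ -1 by simp [hrm]),
            pvGetSet t 0 m i (-1) hm0 htl hi]
        simp [hrm]
      · rw [if_pos (show pvRd w c m ≠ -1 from hrm), if_neg hrm]
        by_cases hm' : m = 0
        · subst hm'
          rw [if_pos (show (0 : Int) = 0 from rfl),
              if_neg (show ¬ ((0 : Int) ≠ 0 ∧ i = 0 - 1) by simp)]
        · rw [if_neg hm', pvGetSet t 0 (m - 1) i _ (by omega) (by omega) hi]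
          by_cases hieq : i = m - 1
          · rw [if_pos hieq, if_pos (show m ≠ 0 ∧ i = m - 1 from ⟨hm', hieq⟩)]
          · rw [if_neg hieq, if_neg (show ¬ (m ≠ 0 ∧ i = m - 1) by tauto)]
    by_cases h1 : j ≤ m - 1
    · rw [if_pos h1, if_pos (show j ≤ m by omega)]
      by_cases hrj : pvRd w c j = -1
      · rw [if_pos hrj, if_pos hrj]
      · rw [if_neg hrj, if_neg hrj]
        by_cases h2 : j < m - 1 ∧ pvRd w c (j + 1) ≠ -1
        · rw [if_pos h2,
              if_pos (show j < m ∧ pvRd w c (j + 1) ≠ -1 from ⟨by omega, h2.2⟩)]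
        · by_cases h3 : j < m ∧ pvRd w c (j + 1) ≠ -1
          · -- then j = m - 1 and cell m ≠ -1: the step wrote pvRd w c m at index m-1
            have hjm : j = m - 1 := by omega
            have hjm1 : j + 1 = m := by omega
            have hm' : m ≠ 0 := by omega
            rw [if_neg h2, if_pos h3, hstep j (by omega),
                if_neg (hjm1 ▸ h3.2),
                if_pos (show m ≠ 0 ∧ j = m - 1 from ⟨hm', hjm⟩), hjm1]
          · -- cell j+1 is -1 (or j = m-1 edge): untouched entry
            rw [if_neg h2, if_neg h3, hstep j (by omega)]
            by_cases hrm : pvRd w c m = -1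
            · rw [if_pos hrm, if_neg (show ¬ j = m by omega)]
            · rw [if_neg hrm, if_neg (show ¬ (m ≠ 0 ∧ j = m - 1) by
                rintro ⟨hm', hjm⟩
                exact h3 ⟨by omega, by rw [show j + 1 = m by omega]; exact hrm⟩)]
    · by_cases hjm : j = m
      · rw [if_neg h1, if_pos (show j ≤ m by omega), hstep j (by omega)]
        by_cases hrm : pvRd w c j = -1
        · rw [if_pos (hjm ▸ hrm), if_pos hjm, if_pos hrm]
        · rw [if_neg (hjm ▸ hrm),
              if_neg (show ¬ (m ≠ 0 ∧ j = m - 1) by omega), if_neg hrm,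
              if_neg (show ¬ (j < m ∧ pvRd w c (j + 1) ≠ -1) by
                rintro ⟨h', _⟩; omega)]
      · rw [if_neg h1, if_neg (show ¬ j ≤ m by omega), hstep j (by omega)]
        by_cases hrm : pvRd w c m = -1
        · rw [if_pos hrm, if_neg (show ¬ j = m by omega)]
        · rw [if_neg hrm, if_neg (show ¬ (m ≠ 0 ∧ j = m - 1) by omega)]

-- B's single pass, started at row m with accumulator `a` on a world W that still
-- holds w's original values on the unprocessed rows, performs exactly A's second
-- loop (writing the _tmp values) on those rows.
theorem pvBfold (w : List (List Int)) (c e s : Int) (tmp : List Int)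
    (htmp : ∀ r, e < r → r ≤ s → PySem.List.pyGetD tmp r 0 =
      (if pvRd w c r = -1 then -1
       else if r < s ∧ pvRd w c (r + 1) ≠ -1 then pvRd w c (r + 1) else 0))
    (he : -1 ≤ e) (hs : s < (w.length : Int)) :
    ∀ (n : Nat) (m : Int), m - e = (n : Int) → e ≤ m → m ≤ s →
    ∀ (W : List (List Int)) (a : Int), W.length = w.length →
    (∀ r, e < r → r ≤ m → pvRd W c r = pvRd w c r) →
    ((m = s ∧ a = -1) ∨ (m < s ∧ a = pvRd w c (m + 1))) →
    ((PySem.List.pyRange m e (-1)).foldl (pvStepB c) (W, a)).1 =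
      (PySem.List.pyRange m e (-1)).foldl
        (fun W' r => pvWrite W' r c (PySem.List.pyGetD tmp r 0)) W := by
  intro n
  induction n with
  | zero =>
    intro m hme _ _ W a _ _ _
    rw [PySem.List.pyRange_neg_one_eq_nil (by omega)]
    rfl
  | succ k ih =>
    intro m hme hem hms W a hWl hread ha
    have hlt : e < m := by omega
    rw [PySem.List.pyRange_neg_one_cons hlt]
    simp only [List.foldl_cons]
    have hm0 : 0 ≤ m := by omega
    have hcur : pvRd W c m = pvRd w c m := hread m hlt le_rfl
    have hv : (if pvRd W c m = -1 then -1 else if a ≠ -1 then a else 0) =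
        PySem.List.pyGetD tmp m 0 := by
      rw [htmp m hlt hms, hcur]
      by_cases hrm : pvRd w c m = -1
      · rw [if_pos hrm, if_pos hrm]
      · rw [if_neg hrm, if_neg hrm]
        rcases ha with ⟨hmeq, haeq⟩ | ⟨hmlt, haeq⟩
        · rw [if_neg (show ¬ (m < s ∧ pvRd w c (m + 1) ≠ -1) by omega), haeq]
          simp
        · subst haeq
          by_cases hA : pvRd w c (m + 1) = -1
          · rw [if_neg (show ¬ (m < s ∧ pvRd w c (m + 1) ≠ -1) by tauto)]
            simp [hA]
          · rw [if_pos (show pvRd w c (m + 1) ≠ -1 from hA),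
                if_pos (show m < s ∧ pvRd w c (m + 1) ≠ -1 from ⟨hmlt, hA⟩)]
    have hstepB : pvStepB c (W, a) m =
        (pvWrite W m c (PySem.List.pyGetD tmp m 0), pvRd w c m) := by
      unfold pvStepB
      simp only
      rw [hv, hcur]
    rw [hstepB]
    exact ih (m - 1) (by omega) (by omega) (by omega) _ _
      (by rw [pvWriteLen, hWl])
      (fun r hr1 hr2 => by
        rw [pvRdWrite W m c c r _ hm0 (by omega) (by omega) (by omega)]
        exact hread r hr1 (by omega))
      (Or.inr ⟨by omega, by rw [show m - 1 + 1 = m by omega]⟩)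

-- ===== VERDICT (by name: the statement is the Claim_ definition above) =====
theorem ShiftU_spec : Claim_equal_ShiftU := by
  intro w c s e _ hpre
  unfold Spec_ShiftU ShiftU ShiftU_alt
  dsimp only
  by_cases hse : s ≤ e
  · rw [PySem.List.pyRange_neg_one_eq_nil hse]
    rfl
  · have hes : e < s := by omega
    have he : -1 ≤ e := by
      rcases hpre with h | h
      · omega
      · exact h.1
    have hs : s < (w.length : Int) := by
      rcases hpre with h | h
      · omega
      · exact h.2.1
    symm
    refine pvBfold w c e s _ ?_ he hs (s - e).toNat s (by omega) (by omega) le_rfl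
      w (-1) rfl (fun _ _ _ => rfl) (Or.inl ⟨rfl, rfl⟩)
    intro r hr1 hr2
    rw [pvTmpInv w c e he (s - e).toNat s (by omega) (by omega)
        (List.replicate (s + 1).toNat 0)
        (by simp only [List.length_replicate]; omega) r hr1,
        if_pos hr2, pvGetReplicate _ r (by omega)]
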